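-- pv_equiv track=rewrite | github.com/Cyuhaohao/CS166 | CS166_3.1.py | count
-- ===== SOURCE A (Python) =====
-- def count(ar):
--     k=0
--     l=0
--     for a in ar:
--         for b in a:
--             if b==2:
--                 k+=1
--             if b==1:
--                 l+=1
--     return k,l
-- ===== SOURCE B (Python) =====
-- def count(ar):
--     if not ar:
--         return 0, 0
--     k, l = count(ar[1:])
--     return ar[0].count(2) + k, ar[0].count(1) + l
-- ===== Notes on version B (the rewrite author's own statement) =====
-- stated objective: alternative
-- what changed: Replaces the nested element loop with two branch tests by structural recursion over the rows, counting each row's 2s and 1s with the built-in list.count and summing the tail's result.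
import Mathlib
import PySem

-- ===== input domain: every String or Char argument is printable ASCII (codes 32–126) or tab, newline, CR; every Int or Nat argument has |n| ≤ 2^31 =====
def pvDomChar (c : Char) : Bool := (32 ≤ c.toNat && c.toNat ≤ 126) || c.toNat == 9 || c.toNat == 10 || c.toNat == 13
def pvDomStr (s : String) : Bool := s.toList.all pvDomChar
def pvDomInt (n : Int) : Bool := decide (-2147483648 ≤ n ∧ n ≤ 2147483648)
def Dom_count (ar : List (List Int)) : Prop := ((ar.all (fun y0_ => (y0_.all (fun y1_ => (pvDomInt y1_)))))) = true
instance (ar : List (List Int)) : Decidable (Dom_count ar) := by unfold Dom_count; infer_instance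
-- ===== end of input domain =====

-- ===== PORT A =====
def count (ar : List (List Int)) : Int × Int :=
  ar.foldl (fun (kl : Int × Int) a =>
    a.foldl (fun (kl : Int × Int) b =>
      let kl := if b == 2 then (kl.1 + 1, kl.2) else kl
      if b == 1 then (kl.1, kl.2 + 1) else kl) kl) (0, 0)

-- ===== PORT B =====
def count_alt (ar : List (List Int)) : Int × Int :=
  match ar with
  | [] => (0, 0)
  | row :: rest =>
    let kl := count_alt rest
    ((PySem.List.count row 2 : Int) + kl.1, (PySem.List.count row 1 : Int) + kl.2)

-- ===== PRECONDITION & SPEC =====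
def Spec_count (ar : List (List Int)) (out : Int × Int) : Prop := out = count_alt ar
instance (ar : List (List Int)) (out : Int × Int) : Decidable (Spec_count ar out) := by unfold Spec_count; infer_instance

-- ===== CLAIM (what is proved, stated in full; the proofs are below) =====
def Claim_equal_count : Prop := ∀ (ar : List (List Int)), Dom_count ar → Spec_count ar (count ar)

-- ===== LEMMAS AND PROOFS =====

-- ===== VERDICT (by name: the statement is the Claim_ definition above) =====
lemma count_inner (a : List Int) (kl : Int × Int) :
    a.foldl (fun (kl : Int × Int) b =>
      let kl := if b == 2 then (kl.1 + 1, kl.2) else kl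
      if b == 1 then (kl.1, kl.2 + 1) else kl) kl
      = (kl.1 + a.count 2, kl.2 + a.count 1) := by
  induction a generalizing kl with
  | nil => simp
  | cons x xs ih =>
    simp only [List.foldl_cons, List.count_cons, ih]
    by_cases h2 : x = 2 <;> by_cases h1 : x = 1 <;>
      simp [h2, h1, Prod.ext_iff] <;> omega

lemma count_foldl_eq (ar : List (List Int)) (kl : Int × Int) :
    ar.foldl (fun (kl : Int × Int) a =>
      a.foldl (fun (kl : Int × Int) b =>
        let kl := if b == 2 then (kl.1 + 1, kl.2) else kl
        if b == 1 then (kl.1, kl.2 + 1) else kl) kl) kl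
    = (kl.1 + (count_alt ar).1, kl.2 + (count_alt ar).2) := by
  induction ar generalizing kl with
  | nil => simp [count_alt]
  | cons a rest ih =>
    rw [List.foldl_cons, count_inner, ih]
    simp only [count_alt, PySem.List.count_eq, Prod.ext_iff]
    constructor <;> ring

theorem count_spec : Claim_equal_count := by
  intro ar _
  unfold Spec_count count
  rw [count_foldl_eq]
  simp
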